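-- pv_equiv track=rewrite | github.com/williambrady/portfolio-code-scanner | src/formatters/sarif_formatter.py | _group_by_tool
-- ===== SOURCE A (Python) =====
-- from typing import Dict, Any, List
--
-- def _group_by_tool(
--     findings: List[Dict[str, Any]]
-- ) -> Dict[str, List[Dict[str, Any]]]:
--     """Group findings by their source tool"""
--     tools: Dict[str, List[Dict[str, Any]]] = {}
--     for finding in findings:
--         tool = finding.get("tool", "unknown")
--         if tool not in tools:
--             tools[tool] = []
--         tools[tool].append(finding)
--     return tools
-- ===== SOURCE B (Python) =====
-- from typing import Dict, Any, List
--
-- def _group_by_tool(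
--     findings: List[Dict[str, Any]]
-- ) -> Dict[str, List[Dict[str, Any]]]:
--     """Group findings by their source tool"""
--     order = list(dict.fromkeys(f.get("tool", "unknown") for f in findings))
--     return {tool: [f for f in findings if f.get("tool", "unknown") == tool]
--             for tool in order}
-- ===== Notes on version B (the rewrite author's own statement) =====
-- stated objective: alternative
-- what changed: Replaces the single-pass mutate-a-dict grouping (insert-empty-then-append per finding) with a two-phase ordered-dedup of the keys followed by one filter comprehension per distinct tool.
import Mathlib
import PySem

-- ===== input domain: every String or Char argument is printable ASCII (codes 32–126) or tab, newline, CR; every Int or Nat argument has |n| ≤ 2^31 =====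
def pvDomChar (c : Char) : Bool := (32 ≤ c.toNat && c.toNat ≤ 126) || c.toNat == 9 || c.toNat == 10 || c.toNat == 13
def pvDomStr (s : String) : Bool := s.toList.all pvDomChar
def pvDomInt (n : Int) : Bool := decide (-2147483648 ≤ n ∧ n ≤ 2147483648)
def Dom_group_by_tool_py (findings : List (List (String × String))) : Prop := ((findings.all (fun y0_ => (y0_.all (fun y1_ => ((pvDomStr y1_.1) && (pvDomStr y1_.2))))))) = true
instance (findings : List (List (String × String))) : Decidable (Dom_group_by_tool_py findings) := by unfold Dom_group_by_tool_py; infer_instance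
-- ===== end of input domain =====

-- B replaces A's single-pass mutate-a-dict grouping by ordered key dedup + one filter per distinct tool (alternative decomposition; return value only).
-- ===== PORT A =====
-- finding.get("tool", "unknown") on the finding dict (both Pythons use the same expression)
def toolOf (finding : List (String × String)) : String :=
  (PySem.Dict.mk finding).getD "tool" "unknown"

def group_by_tool_py (findings : List (List (String × String))) : List (String × List (List (String × String))) :=
  (findings.foldl (fun tools finding =>
      let tool := toolOf finding
      let tools := if tools.contains tool then tools else tools.insert tool []
      tools.modify tool [] (fun l => l ++ [finding]))
    PySem.Dict.empty).items

-- ===== PORT B =====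
def group_by_tool_py_alt (findings : List (List (String × String))) : List (String × List (List (String × String))) :=
  (PySem.List.dedup (findings.map toolOf)).map
    (fun tool => (tool, findings.filter (fun f => toolOf f == tool)))

-- ===== PRECONDITION & SPEC =====
def Spec_group_by_tool_py (findings : List (List (String × String))) (out : List (String × List (List (String × String)))) : Prop := out = group_by_tool_py_alt findings
instance (findings : List (List (String × String))) (out : List (String × List (List (String × String)))) : Decidable (Spec_group_by_tool_py findings out) := by unfold Spec_group_by_tool_py; infer_instance

-- ===== CLAIM (what is proved, stated in full; the proofs are below) =====
def Claim_equal_group_by_tool_py : Prop := ∀ (findings : List (List (String × String))), Dom_group_by_tool_py findings → Spec_group_by_tool_py findings (group_by_tool_py findings)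

-- ===== LEMMAS AND PROOFS =====

-- A's loop body (insert [] if absent, then append) is exactly one Dict.modify
theorem stepA_eq_modify (d : PySem.Dict String (List (List (String × String))))
    (t : String) (f : List (String × String)) :
    ((if d.contains t then d else d.insert t []).modify t [] (fun l => l ++ [f]))
      = d.modify t [] (fun l => l ++ [f]) := by
  by_cases h : d.contains t = true
  · simp [h]
  · have h' : d.contains t = false := by simpa using h
    simp only [h', Bool.false_eq_true, if_false, PySem.Dict.modify,
      PySem.Dict.getD_insert_self, PySem.Dict.insert_insert_self]
    rw [PySem.Dict.getD_of_not_contains]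
    exact h'

theorem foldA_eq_modify (findings : List (List (String × String)))
    (d : PySem.Dict String (List (List (String × String)))) :
    findings.foldl (fun tools finding =>
        let tool := toolOf finding
        let tools := if tools.contains tool then tools else tools.insert tool []
        tools.modify tool [] (fun l => l ++ [finding])) d
      = findings.foldl (fun tools finding =>
          tools.modify (toolOf finding) [] (fun l => l ++ [finding])) d := by
  simp only [stepA_eq_modify]

theorem foldA_as_pairs (findings : List (List (String × String))) :
    findings.foldl (fun tools finding =>
        tools.modify (toolOf finding) [] (fun l => l ++ [finding])) PySem.Dict.empty
      = (findings.map (fun f => (toolOf f, f))).foldl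
          (fun d p => d.modify p.1 [] (fun l => l ++ [p.2])) PySem.Dict.empty :=
  by rw [List.foldl_map]

-- ===== VERDICT (by name: the statement is the Claim_ definition above) =====
theorem group_by_tool_py_spec : Claim_equal_group_by_tool_py := by
  intro findings _
  unfold Spec_group_by_tool_py group_by_tool_py group_by_tool_py_alt
  rw [foldA_eq_modify]
  have hnd : (findings.foldl (fun tools finding =>
      tools.modify (toolOf finding) [] (fun l => l ++ [finding])) PySem.Dict.empty).keys.Nodup :=
    PySem.Dict.nodup_keys_foldl_modify_key findings toolOf []
      (fun _ f => fun l => l ++ [f]) PySem.Dict.empty (by simp)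
  rw [PySem.Dict.items_eq_map_keys _ hnd [],
      PySem.Dict.keys_foldl_modify_key]
  simp only [PySem.Dict.keys_empty, PySem.Set.update_nil_left, PySem.List.dedup_eq_ofList]
  refine List.map_congr_left (fun t _ => ?_)
  rw [foldA_as_pairs, PySem.Dict.getD_foldl_modify_append]
  simp [List.filter_map, Function.comp_def]
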